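-- pv_equiv track=rewrite | github.com/james-stuff/AdventofCode | main.py | day_9_get_all_groups_in_row
-- ===== SOURCE A (Python) =====
-- def day_9_get_all_groups_in_row(row: [int]) -> [[int]]:
--     current_group, all_groups = [], []
--     for i in range(len(row)):
--         if row[i] < 9:
--             current_group.append(i)
--         elif current_group:
--             all_groups.append(current_group)
--             current_group = []
--     if current_group:
--         all_groups.append(current_group)
--     return all_groups
-- ===== SOURCE B (Python) =====
-- from itertools import groupby
--
--
-- def day_9_get_all_groups_in_row(row: [int]) -> [[int]]:
--     return [list(g) for k, g in groupby(range(len(row)), key=lambda i: row[i] < 9) if k]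
-- ===== Notes on version B (the rewrite author's own statement) =====
-- stated objective: idiomatic
-- what changed: Replaces the manual accumulator-with-boundary-flush scan by itertools.groupby partitioning the indices into maximal runs keyed by row[i] < 9, then keeping the True runs.
import Mathlib
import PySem

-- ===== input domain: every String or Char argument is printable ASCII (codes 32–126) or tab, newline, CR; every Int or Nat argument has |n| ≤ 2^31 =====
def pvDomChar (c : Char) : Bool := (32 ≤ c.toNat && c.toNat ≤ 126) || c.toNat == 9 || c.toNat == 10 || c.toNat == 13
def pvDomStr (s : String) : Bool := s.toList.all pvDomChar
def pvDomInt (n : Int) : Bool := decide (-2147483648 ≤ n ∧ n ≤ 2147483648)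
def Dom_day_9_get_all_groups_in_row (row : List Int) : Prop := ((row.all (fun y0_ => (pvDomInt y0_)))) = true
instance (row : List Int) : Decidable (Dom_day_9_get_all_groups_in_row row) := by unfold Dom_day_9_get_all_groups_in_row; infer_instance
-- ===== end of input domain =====

-- B: itertools.groupby over the indices keyed by row[i] < 9 instead of a manual
-- accumulator with boundary flushing (idiomatic decomposition; same O(n) cost).
-- ===== PORT A =====
-- the loop `for i in range(len(row))` reading row[i] is ported as a fold over
-- PySem.List.enumerate row (exact: same indices, same values, same order)
def pvStepA (st : List Int × List (List Int)) (p : Int × Int) : List Int × List (List Int) :=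
  if p.2 < 9 then (st.1 ++ [p.1], st.2)
  else if st.1 ≠ [] then ([], st.2 ++ [st.1])
  else st

def day_9_get_all_groups_in_row (row : List Int) : List (List Int) :=
  let st := (PySem.List.enumerate row).foldl pvStepA ([], [])
  if st.1 ≠ [] then st.2 ++ [st.1] else st.2

-- ===== PORT B =====
-- groupby(range(len(row)), key=lambda i: row[i] < 9): maximal runs of indices with
-- equal key, in order (ported as a structural groupby over PySem.List.enumerate row)
def pvGroupBy : List (Int × Int) → List (Bool × List Int)
  | [] => []
  | (i, v) :: rest =>
    match pvGroupBy rest with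
    | (k, g) :: gs =>
      if decide (v < 9) = k then (k, i :: g) :: gs
      else (decide (v < 9), [i]) :: (k, g) :: gs
    | [] => [(decide (v < 9), [i])]

def day_9_get_all_groups_in_row_alt (row : List Int) : List (List Int) :=
  (pvGroupBy (PySem.List.enumerate row)).filterMap (fun p => if p.1 then some p.2 else none)

-- ===== PRECONDITION & SPEC =====
def Spec_day_9_get_all_groups_in_row (row : List Int) (out : List (List Int)) : Prop := out = day_9_get_all_groups_in_row_alt row
instance (row : List Int) (out : List (List Int)) : Decidable (Spec_day_9_get_all_groups_in_row row out) := by unfold Spec_day_9_get_all_groups_in_row; infer_instance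

-- ===== CLAIM (what is proved, stated in full; the proofs are below) =====
def Claim_equal_day_9_get_all_groups_in_row : Prop := ∀ (row : List Int), Dom_day_9_get_all_groups_in_row row → Spec_day_9_get_all_groups_in_row row (day_9_get_all_groups_in_row row)

-- ===== LEMMAS AND PROOFS =====

-- the True-run filter of B, as a standalone helper for the lemmas
def pvFilt (rs : List (Bool × List Int)) : List (List Int) :=
  rs.filterMap (fun p => if p.1 then some p.2 else none)

-- direct recursive characterisation of A's loop with open group `cur`
def pvF (cur : List Int) : List (Int × Int) → List (List Int)
  | [] => if cur ≠ [] then [cur] else []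
  | (i, v) :: rest =>
    if v < 9 then pvF (cur ++ [i]) rest
    else (if cur ≠ [] then [cur] else []) ++ pvF [] rest

-- what `pvF cur l` is in terms of B's run decomposition of l
def pvMerge (cur : List Int) (r : List (Bool × List Int)) : List (List Int) :=
  if cur = [] then pvFilt r
  else match r with
    | (true, g) :: gs => (cur ++ g) :: pvFilt gs
    | r => cur :: pvFilt r

theorem pvFoldA_eq_pvF (l : List (Int × Int)) :
    ∀ (cur : List Int) (acc : List (List Int)),
      (let st := l.foldl pvStepA (cur, acc);
        if st.1 ≠ [] then st.2 ++ [st.1] else st.2) = acc ++ pvF cur l := by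
  induction l with
  | nil =>
    intro cur acc
    by_cases hc : cur = [] <;> simp [pvF, hc]
  | cons p rest ih =>
    intro cur acc
    obtain ⟨i, v⟩ := p
    by_cases hv : v < 9
    · simpa [pvStepA, pvF, hv] using ih (cur ++ [i]) acc
    · by_cases hc : cur = []
      · simpa [pvStepA, pvF, hv, hc] using ih [] acc
      · simpa [pvStepA, pvF, hv, hc] using ih [] (acc ++ [cur])

theorem pvF_eq_merge_groupBy (l : List (Int × Int)) :
    ∀ (cur : List Int), pvF cur l = pvMerge cur (pvGroupBy l) := by
  induction l with
  | nil =>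
    intro cur
    by_cases hc : cur = [] <;> simp [pvF, pvMerge, pvGroupBy, pvFilt, hc]
  | cons p rest ih =>
    intro cur
    obtain ⟨i, v⟩ := p
    by_cases hv : v < 9
    · have h1 := ih (cur ++ [i])
      rcases hg : pvGroupBy rest with _ | ⟨⟨k, g⟩, gs⟩ <;>
        [skip; cases k] <;> by_cases hc : cur = [] <;>
        simp [pvF, pvGroupBy, pvMerge, pvFilt, hv, hg, hc] at h1 ⊢ <;>
        simp [h1]
    · have h1 := ih []
      rcases hg : pvGroupBy rest with _ | ⟨⟨k, g⟩, gs⟩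
      · by_cases hc : cur = [] <;>
          simp [pvF, pvGroupBy, pvMerge, pvFilt, hv, hg, hc, h1]
      · cases k <;> by_cases hc : cur = [] <;>
          simp [pvF, pvGroupBy, pvMerge, pvFilt, hv, hg, hc, h1]

-- ===== VERDICT (by name: the statement is the Claim_ definition above) =====
theorem day_9_get_all_groups_in_row_spec : Claim_equal_day_9_get_all_groups_in_row := by
  intro row _
  unfold Spec_day_9_get_all_groups_in_row day_9_get_all_groups_in_row day_9_get_all_groups_in_row_alt
  have h := pvFoldA_eq_pvF (PySem.List.enumerate row) [] []
  simp only [List.nil_append] at h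
  rw [h, pvF_eq_merge_groupBy]
  simp [pvMerge, pvFilt]
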